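-- pv_equiv track=rewrite | github.com/schwxd/model-based-transfer-for-bearing-diagnosis | main.py | get_labels_list
-- ===== SOURCE A (Python) =====
-- def get_labels_list(filelist):
--     labels_dict = {}
--     value = 0
--     for filename in filelist:
--         label = filename.split('.')[0]
--         if not label in labels_dict:
--             labels_dict[label] = value
--             value += 1
--     return labels_dict
-- ===== SOURCE B (Python) =====
-- def get_labels_list(filelist):
--     prefixes = [fn.split('.')[0] for fn in filelist]
--     return {p: len(set(prefixes[:i]))
--             for i, p in enumerate(prefixes)
--             if p not in prefixes[:i]}
-- ===== Notes on version B (the rewrite author's own statement) =====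
-- stated objective: alternative
-- what changed: B drops the dict-and-running-counter loop entirely: it computes each first-occurrence prefix's label independently as the number of distinct prefixes strictly before it (len(set(prefixes[:i]))), trading A's single stateful pass for index-based slice/set arithmetic (quadratic but stateless).
import Mathlib
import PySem

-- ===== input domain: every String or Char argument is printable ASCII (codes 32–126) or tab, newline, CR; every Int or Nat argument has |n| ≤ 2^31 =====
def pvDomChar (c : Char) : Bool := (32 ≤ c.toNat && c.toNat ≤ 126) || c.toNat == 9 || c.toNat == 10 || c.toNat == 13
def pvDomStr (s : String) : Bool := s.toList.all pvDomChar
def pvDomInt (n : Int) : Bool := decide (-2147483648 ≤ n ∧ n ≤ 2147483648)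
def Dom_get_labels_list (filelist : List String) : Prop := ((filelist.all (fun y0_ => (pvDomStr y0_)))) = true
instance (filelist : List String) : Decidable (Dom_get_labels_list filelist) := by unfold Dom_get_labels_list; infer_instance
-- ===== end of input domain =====

-- B replaces A's dict+running-counter loop with stateless index arithmetic: each first-occurrence prefix's label is the count of distinct prefixes strictly before it; same return value (alternative decomposition, not faster).


-- shared helper: fn.split('.')[0]  (split with a nonempty separator never yields [], so [0] never raises)
def pvPrefix (fn : String) : String := (((PySem.Str.split? fn ".").getD []).headD "")

-- ===== PORT A =====
-- A's loop: dict + running counter; insert only when the prefix is not yet a key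
def pvAStep (st : List (String × Int) × Int) (fn : String) : List (String × Int) × Int :=
  let label := pvPrefix fn
  if st.1.any (fun p => p.1 == label) then st
  else (st.1 ++ [(label, st.2)], st.2 + 1)

def get_labels_list (filelist : List String) : List (String × Int) :=
  (filelist.foldl pvAStep ([], 0)).1

-- ===== PORT B =====
-- the dict comprehension over enumerate(prefixes): keep (p, len(set(prefixes[:i]))) when p not in prefixes[:i]
def pvBuild (ps : List String) : List (String × Int) :=
  ((PySem.List.enumerate ps).filter
      (fun ip => !(PySem.List.slice ps (some 0) (some ip.1)).contains ip.2)).map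
    (fun ip => (ip.2, PySem.Set.len (PySem.Set.ofList (PySem.List.slice ps (some 0) (some ip.1)))))

def get_labels_list_alt (filelist : List String) : List (String × Int) :=
  let prefixes := filelist.map pvPrefix
  pvBuild prefixes

-- ===== PRECONDITION & SPEC =====
def Spec_get_labels_list (filelist : List String) (out : List (String × Int)) : Prop := out = get_labels_list_alt filelist
instance (filelist : List String) (out : List (String × Int)) : Decidable (Spec_get_labels_list filelist out) := by unfold Spec_get_labels_list; infer_instance

-- ===== CLAIM (what is proved, stated in full; the proofs are below) =====
def Claim_equal_get_labels_list : Prop := ∀ (filelist : List String), Dom_get_labels_list filelist → Spec_get_labels_list filelist (get_labels_list filelist)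

-- ===== LEMMAS AND PROOFS =====
theorem pvSlice_take (xs : List String) (k : Nat) :
    PySem.List.slice xs (some 0) (some (k : Int)) = xs.take k := by
  simp [PySem.List.slice_to_natCast]

theorem pvBuild_append (qs : List String) (p : String) :
    pvBuild (qs ++ [p]) =
      pvBuild qs ++ (if qs.contains p then []
        else [(p, PySem.Set.len (PySem.Set.ofList qs))]) := by
  unfold pvBuild
  rw [PySem.List.enumerate_append, List.filter_append, List.map_append]
  have hsl : ∀ ip ∈ PySem.List.enumerate qs 0,
      PySem.List.slice (qs ++ [p]) (some 0) (some ip.1)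
        = PySem.List.slice qs (some 0) (some ip.1) := by
    intro ip hip
    rcases (PySem.List.mem_enumerate_iff qs 0 ip).1 hip with ⟨k, hk, rfl⟩
    simp only [zero_add, pvSlice_take]
    exact List.take_append_of_le_length (Nat.le_of_lt hk)
  congr 1
  · have hf := List.filter_congr (l := PySem.List.enumerate qs 0)
      (p := fun ip => !(PySem.List.slice (qs ++ [p]) (some 0) (some ip.1)).contains ip.2)
      (q := fun ip => !(PySem.List.slice qs (some 0) (some ip.1)).contains ip.2)
      (fun ip hip => by simp only [hsl ip hip])
    rw [hf]
    exact List.map_congr_left fun ip hip => by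
      rw [hsl ip (List.mem_of_mem_filter hip)]
  · have hq : PySem.List.slice (qs ++ [p]) (some 0) (some ((0:Int) + qs.length))
        = qs := by
      have : ((0:Int) + qs.length) = ((qs.length : Nat) : Int) := by ring
      rw [this, pvSlice_take]
      simp
    simp only [PySem.List.enumerate_cons, PySem.List.enumerate_nil,
      List.filter_cons, List.filter_nil, hq]
    by_cases hp : p ∈ qs
    · simp [hp]
    · simp [hp]

theorem pvBuild_keys (qs : List String) (p : String) :
    (pvBuild qs).any (fun q => q.1 == p) = qs.contains p := by
  induction qs using List.reverseRecOn with
  | nil => simp [pvBuild]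
  | append_singleton qs x ih =>
    rw [pvBuild_append, List.any_append, ih]
    by_cases hx : x ∈ qs
    · by_cases hp : p ∈ qs
      · simp [hx, hp]
      · have hpx : ¬ p = x := fun h => hp (h ▸ hx)
        simp [hx, hp, hpx]
    · have hbp : (x == p) = decide (p = x) := by
        by_cases h : p = x
        · simp [h]
        · have h1 : (x == p) = false := beq_eq_false_iff_ne.mpr (fun hh => h hh.symm)
          simp [h1, h]
      simp [hx, hbp]

theorem pv_main (ps : List String) :
    ps.foldl (fun st label =>
        if st.1.any (fun p => p.1 == label) then st
        else (st.1 ++ [(label, st.2)], st.2 + 1)) ([], 0) =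
      (pvBuild ps, PySem.Set.len (PySem.Set.ofList ps)) := by
  induction ps using List.reverseRecOn with
  | nil => simp [pvBuild]
  | append_singleton qs p ih =>
    rw [List.foldl_append, ih]
    simp only [List.foldl_cons, List.foldl_nil, pvBuild_keys,
      pvBuild_append, PySem.Set.ofList_append_singleton]
    by_cases hp : p ∈ qs
    · simp [hp, PySem.Set.add, PySem.Set.contains]
    · simp [hp, PySem.Set.add, PySem.Set.contains, PySem.Set.mem_ofList,
        PySem.Set.len]

-- ===== VERDICT (by name: the statement is the Claim_ definition above) =====
theorem get_labels_list_spec : Claim_equal_get_labels_list := by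
  intro filelist _
  unfold Spec_get_labels_list get_labels_list get_labels_list_alt
  have h := pv_main (filelist.map pvPrefix)
  have : (filelist.map pvPrefix).foldl (fun st label =>
        if st.1.any (fun p => p.1 == label) then st
        else (st.1 ++ [(label, st.2)], st.2 + 1)) ([], 0)
      = filelist.foldl pvAStep ([], 0) := by
    rw [List.foldl_map]; rfl
  rw [this] at h
  simpa using congrArg Prod.fst h
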